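-- pv_equiv track=rewrite | github.com/MeZahra/Thesis_code_Glm_Opt | Beta_preprocessing.py | _select_roi_indices
-- ===== SOURCE A (Python) =====
-- def _select_roi_indices(labels, label_patterns):
--     """Select atlas label indices matching requested patterns.
--
--     Parameters
--     ----------
--     labels : sequence of str
--         Atlas label names; index 0 is assumed to be background.
--     label_patterns : str or None
--         Comma-separated substrings to match (case-insensitive); None selects all.
--
--     Returns
--     -------
--     indices : list of int
--         Label indices that match requested patterns.
--     """
--     patterns = []
--     if label_patterns:
--         patterns = [p.strip().lower() for p in label_patterns.split(",") if p.strip()]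
--     indices = []
--     for idx, name in enumerate(labels):
--         if idx == 0 or name.strip().lower() == "background":
--             continue
--         if not patterns:
--             indices.append(idx)
--             continue
--         lname = name.lower()
--         if any(pattern in lname for pattern in patterns):
--             indices.append(idx)
--     return indices
-- ===== SOURCE B (Python) =====
-- def _select_roi_indices(labels, label_patterns):
--     # Pattern-major strategy: build the eligible (index, lowered-name) pairs once,
--     # then sweep each pattern over them collecting hit indices in a set.
--     eligible = [(idx, name.lower()) for idx, name in enumerate(labels)
--                 if idx != 0 and name.strip().lower() != "background"]
--     if not label_patterns:
--         return [idx for idx, _ in eligible]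
--     patterns = [p.strip().lower() for p in label_patterns.split(",") if p.strip()]
--     if not patterns:
--         return [idx for idx, _ in eligible]
--     hits = set()
--     for pattern in patterns:
--         for idx, lname in eligible:
--             if pattern in lname:
--                 hits.add(idx)
--     return [idx for idx, _ in eligible if idx in hits]
-- ===== Notes on version B (the rewrite author's own statement) =====
-- stated objective: alternative
-- what changed: Replaces A's single label-major pass (per-label any() over patterns, appending as it goes) with a pattern-major sweep: eligible (index, lowercased-name) pairs are materialized once, each pattern is scanned over them collecting hit indices into a set, and the result is the eligible indices filtered by set membership.
import Mathlib
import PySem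

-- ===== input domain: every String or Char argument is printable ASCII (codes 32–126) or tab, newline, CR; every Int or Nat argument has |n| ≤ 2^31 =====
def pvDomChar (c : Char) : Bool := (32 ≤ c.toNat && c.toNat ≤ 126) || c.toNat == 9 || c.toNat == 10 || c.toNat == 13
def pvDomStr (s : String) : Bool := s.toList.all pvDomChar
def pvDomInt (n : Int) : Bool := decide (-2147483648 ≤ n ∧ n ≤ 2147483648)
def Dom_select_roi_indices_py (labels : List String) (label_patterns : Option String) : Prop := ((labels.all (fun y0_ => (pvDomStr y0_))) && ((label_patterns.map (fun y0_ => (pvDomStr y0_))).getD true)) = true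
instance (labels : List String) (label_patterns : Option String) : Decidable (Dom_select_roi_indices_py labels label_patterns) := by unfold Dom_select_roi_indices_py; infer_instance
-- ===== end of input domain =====

-- B replaces A's label-major pass (any() over patterns per label, appending as it goes) with a
-- pattern-major sweep over precomputed eligible (index, lowered-name) pairs collecting hits in a
-- set; same asymptotic cost, genuinely different traversal (objective: alternative).

-- ===== PORT A =====
def select_roi_indices_py (labels : List String) (label_patterns : Option String) : List Int :=
  -- patterns = []; if label_patterns: patterns = [p.strip().lower() for p in label_patterns.split(",") if p.strip()]
  -- (split? with the nonempty literal separator "," is always `some`; getD [] is never taken)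
  let patterns : List String :=
    match label_patterns with
    | none => []
    | some s =>
      if s = "" then []
      else (((PySem.Str.split? s ",").getD []).filter
              (fun p => decide (PySem.Str.strip p ≠ ""))).map
             (fun p => PySem.Str.lower (PySem.Str.strip p))
  (PySem.List.enumerate labels).foldl
    (fun indices pr =>
      if pr.1 = 0 ∨ PySem.Str.lower (PySem.Str.strip pr.2) = "background" then indices
      else if patterns = [] then indices ++ [pr.1]
      else if patterns.any (fun pat => PySem.Str.isIn pat (PySem.Str.lower pr.2)) then
        indices ++ [pr.1]
      else indices)
    []

-- ===== PORT B =====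
def select_roi_indices_py_alt (labels : List String) (label_patterns : Option String) : List Int :=
  let eligible : List (Int × String) :=
    ((PySem.List.enumerate labels).filter
        (fun pr => decide (pr.1 ≠ 0 ∧ PySem.Str.lower (PySem.Str.strip pr.2) ≠ "background"))).map
      (fun pr => (pr.1, PySem.Str.lower pr.2))
  match label_patterns with
  | none => eligible.map (·.1)
  | some s =>
    if s = "" then eligible.map (·.1)
    else
      let patterns : List String :=
        (((PySem.Str.split? s ",").getD []).filter
            (fun p => decide (PySem.Str.strip p ≠ ""))).map
          (fun p => PySem.Str.lower (PySem.Str.strip p))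
      if patterns = [] then eligible.map (·.1)
      else
        let hits : PySem.Set Int :=
          patterns.foldl
            (fun h pat =>
              eligible.foldl
                (fun h pr => if PySem.Str.isIn pat pr.2 then PySem.Set.add h pr.1 else h) h)
            PySem.Set.empty
        (eligible.filter (fun pr => PySem.Set.contains hits pr.1)).map (·.1)

-- ===== PRECONDITION & SPEC =====
def Spec_select_roi_indices_py (labels : List String) (label_patterns : Option String) (out : List Int) : Prop := out = select_roi_indices_py_alt labels label_patterns
instance (labels : List String) (label_patterns : Option String) (out : List Int) : Decidable (Spec_select_roi_indices_py labels label_patterns out) := by unfold Spec_select_roi_indices_py; infer_instance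

-- ===== CLAIM (what is proved, stated in full; the proofs are below) =====
def Claim_equal_select_roi_indices_py : Prop := ∀ (labels : List String) (label_patterns : Option String), Dom_select_roi_indices_py labels label_patterns → Spec_select_roi_indices_py labels label_patterns (select_roi_indices_py labels label_patterns)

-- ===== LEMMAS AND PROOFS =====

-- the per-label test A's loop applies (as one Bool)
def pvKeep (patterns : List String) (pr : Int × String) : Bool :=
  !(decide (pr.1 = 0 ∨ PySem.Str.lower (PySem.Str.strip pr.2) = "background")) &&
    (patterns.isEmpty || patterns.any (fun pat => PySem.Str.isIn pat (PySem.Str.lower pr.2)))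

lemma afold (patterns : List String) (l : List (Int × String)) (acc : List Int) :
    l.foldl
      (fun indices pr =>
        if pr.1 = 0 ∨ PySem.Str.lower (PySem.Str.strip pr.2) = "background" then indices
        else if patterns = [] then indices ++ [pr.1]
        else if patterns.any (fun pat => PySem.Str.isIn pat (PySem.Str.lower pr.2)) then
          indices ++ [pr.1]
        else indices)
      acc
    = acc ++ (l.filter (pvKeep patterns)).map (·.1) := by
  induction l generalizing acc with
  | nil => simp
  | cons pr l ih =>
    simp only [List.foldl_cons, List.filter_cons, ih]
    by_cases h1 : pr.1 = 0 ∨ PySem.Str.lower (PySem.Str.strip pr.2) = "background"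
    · simp [pvKeep, h1]
    · by_cases h2 : patterns = []
      · simp [pvKeep, h1, h2]
      · by_cases h3 : patterns.any (fun pat => PySem.Str.isIn pat (PySem.Str.lower pr.2))
        · simp [List.any_eq_true] at h3
          simp [pvKeep, h1, h2, h3, List.isEmpty_iff]
        · simp [List.any_eq_true] at h3
          have h3' : ¬ ∃ x ∈ patterns, PySem.Chars.isIn x.toList (PySem.Chars.lower pr.2.toList) = true := by
            simpa using h3
          simp [pvKeep, h1, h2, h3', List.isEmpty_iff]

lemma mem_inner (pat : String) (l : List (Int × String)) (h : PySem.Set Int) (x : Int) :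
    x ∈ l.foldl (fun h pr => if PySem.Str.isIn pat pr.2 then PySem.Set.add h pr.1 else h) h ↔
      x ∈ h ∨ ∃ pr ∈ l, pr.1 = x ∧ PySem.Str.isIn pat pr.2 := by
  induction l generalizing h with
  | nil => simp
  | cons pr l ih =>
    simp only [List.foldl_cons, List.mem_cons]
    by_cases hm : PySem.Str.isIn pat pr.2
    · rw [if_pos hm, ih]
      simp only [PySem.Set.mem_add]
      constructor
      · rintro ((hx | hx) | ⟨q, hq, hx1, hx2⟩)
        · tauto
        · exact Or.inr ⟨pr, Or.inl rfl, hx.symm, hm⟩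
        · exact Or.inr ⟨q, Or.inr hq, hx1, hx2⟩
      · rintro (hx | ⟨q, hq | hq, hx1, hx2⟩)
        · tauto
        · subst hq; exact Or.inl (Or.inr hx1.symm)
        · exact Or.inr ⟨q, hq, hx1, hx2⟩
    · rw [if_neg hm, ih]
      constructor
      · rintro (hx | ⟨q, hq, hx1, hx2⟩)
        · tauto
        · exact Or.inr ⟨q, Or.inr hq, hx1, hx2⟩
      · rintro (hx | ⟨q, hq | hq, hx1, hx2⟩)
        · tauto
        · subst hq; exact absurd hx2 hm
        · exact Or.inr ⟨q, hq, hx1, hx2⟩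

lemma mem_hits (patterns : List String) (l : List (Int × String)) (h : PySem.Set Int) (x : Int) :
    x ∈ patterns.foldl
          (fun h pat =>
            l.foldl (fun h pr => if PySem.Str.isIn pat pr.2 then PySem.Set.add h pr.1 else h) h)
          h ↔
      x ∈ h ∨ ∃ pr ∈ l, pr.1 = x ∧ ∃ pat ∈ patterns, PySem.Str.isIn pat pr.2 := by
  induction patterns generalizing h with
  | nil => simp
  | cons pat ps ih =>
    simp only [List.foldl_cons, ih, mem_inner, List.mem_cons]
    constructor
    · rintro ((hx | ⟨q, hq, h1, h2⟩) | ⟨q, hq, h1, p, hp, h2⟩)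
      · tauto
      · exact Or.inr ⟨q, hq, h1, pat, Or.inl rfl, h2⟩
      · exact Or.inr ⟨q, hq, h1, p, Or.inr hp, h2⟩
    · rintro (hx | ⟨q, hq, h1, p, hp | hp, h2⟩)
      · tauto
      · subst hp; exact Or.inl (Or.inr ⟨q, hq, h1, h2⟩)
      · exact Or.inr ⟨q, hq, h1, p, hp, h2⟩

-- membership shape of B's eligible list
lemma mem_eligible (labels : List String) (pr : Int × String) :
    pr ∈ ((PySem.List.enumerate labels).filter
            (fun pr => decide (pr.1 ≠ 0 ∧ PySem.Str.lower (PySem.Str.strip pr.2) ≠ "background"))).map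
          (fun pr => (pr.1, PySem.Str.lower pr.2)) ↔
      ∃ (k : Nat) (h : k < labels.length),
        pr = ((k : Int), PySem.Str.lower labels[k]) ∧
          (k : Int) ≠ 0 ∧ PySem.Str.lower (PySem.Str.strip labels[k]) ≠ "background" := by
  simp only [List.mem_map, List.mem_filter, PySem.List.mem_enumerate_iff]
  constructor
  · rintro ⟨q, ⟨⟨k, hk, rfl⟩, hq⟩, rfl⟩
    simp only [zero_add] at hq ⊢
    simp only [decide_eq_true_eq] at hq
    exact ⟨k, hk, rfl, hq⟩
  · rintro ⟨k, hk, rfl, h1, h2⟩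
    refine ⟨((k : Int), labels[k]), ⟨⟨k, hk, by simp⟩, ?_⟩, rfl⟩
    simp only [decide_eq_true_eq]
    exact ⟨by exact_mod_cast h1, h2⟩

-- the first component determines an eligible pair
lemma eligible_snd_eq (labels : List String) (pr q : Int × String)
    (hp : pr ∈ ((PySem.List.enumerate labels).filter
            (fun pr => decide (pr.1 ≠ 0 ∧ PySem.Str.lower (PySem.Str.strip pr.2) ≠ "background"))).map
          (fun pr => (pr.1, PySem.Str.lower pr.2)))
    (hq : q ∈ ((PySem.List.enumerate labels).filter
            (fun pr => decide (pr.1 ≠ 0 ∧ PySem.Str.lower (PySem.Str.strip pr.2) ≠ "background"))).map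
          (fun pr => (pr.1, PySem.Str.lower pr.2)))
    (h : pr.1 = q.1) : pr = q := by
  rw [mem_eligible] at hp hq
  obtain ⟨k, hk, rfl, -⟩ := hp
  obtain ⟨m, hm, rfl, -⟩ := hq
  simp only at h
  have : k = m := by exact_mod_cast h
  subst this; rfl

-- pushing the (index, lowered-name) map through a filter of B's result
lemma elig_filter_map (P : Int × String → Bool) (l : List (Int × String)) :
    ((l.map (fun pr => (pr.1, PySem.Str.lower pr.2))).filter P).map (·.1)
      = (l.filter (fun pr => P (pr.1, PySem.Str.lower pr.2))).map (·.1) := by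
  induction l with
  | nil => rfl
  | cons pr l ih =>
    simp only [List.map_cons, List.filter_cons]
    by_cases hP : P (pr.1, PySem.Str.lower pr.2)
    · simp [hP, ih]
    · simp [hP, ih]

theorem select_roi_indices_py_eq (labels : List String) (label_patterns : Option String) :
    select_roi_indices_py labels label_patterns = select_roi_indices_py_alt labels label_patterns := by
  unfold select_roi_indices_py select_roi_indices_py_alt
  set q : (Int × String) → Bool :=
    fun pr => decide (pr.1 ≠ 0 ∧ PySem.Str.lower (PySem.Str.strip pr.2) ≠ "background") with hq
  have empty_case :
      (PySem.List.enumerate labels).foldl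
        (fun indices pr =>
          if pr.1 = 0 ∨ PySem.Str.lower (PySem.Str.strip pr.2) = "background" then indices
          else if ([] : List String) = [] then indices ++ [pr.1]
          else if ([] : List String).any (fun pat => PySem.Str.isIn pat (PySem.Str.lower pr.2)) then
            indices ++ [pr.1]
          else indices)
        []
      = (((PySem.List.enumerate labels).filter q).map
          (fun pr => (pr.1, PySem.Str.lower pr.2))).map (·.1) := by
    rw [afold, List.map_map]
    have heq : ((PySem.List.enumerate labels).filter (pvKeep [])) =
        ((PySem.List.enumerate labels).filter q) := by
      apply List.filter_congr
      intro pr _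
      rw [Bool.eq_iff_iff]
      simp [pvKeep, hq]
    rw [heq]
    rfl
  match label_patterns with
  | none => simpa using empty_case
  | some s =>
    by_cases hs : s = ""
    · simp only [hs, reduceIte]
      simpa using empty_case
    · simp only [if_neg hs]
      set patterns : List String :=
        (((PySem.Str.split? s ",").getD []).filter
            (fun p => decide (PySem.Str.strip p ≠ ""))).map
          (fun p => PySem.Str.lower (PySem.Str.strip p)) with hpat
      clear_value patterns
      by_cases hp : patterns = []
      · subst hp
        simpa using empty_case
      · rw [if_neg hp, afold]
        set elig := ((PySem.List.enumerate labels).filter q).map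
          (fun pr => (pr.1, PySem.Str.lower pr.2)) with helig
        have hfilt :
            elig.filter
              (fun pr => PySem.Set.contains
                (patterns.foldl
                  (fun h pat =>
                    elig.foldl
                      (fun h pr => if PySem.Str.isIn pat pr.2 then PySem.Set.add h pr.1 else h) h)
                  PySem.Set.empty) pr.1)
            = elig.filter
                (fun pr => patterns.any (fun pat => PySem.Str.isIn pat pr.2)) := by
          apply List.filter_congr
          intro pr hpr
          rw [Bool.eq_iff_iff, PySem.Set.contains_iff, mem_hits, List.any_eq_true]
          constructor
          · rintro (hx | ⟨pr2, hpr2, h1, pat, hpatm, h2⟩)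
            · exact absurd hx (by simp [PySem.Set.empty])
            · have := eligible_snd_eq labels pr2 pr (helig ▸ hpr2) (helig ▸ hpr) h1
              subst this
              exact ⟨pat, hpatm, h2⟩
          · rintro ⟨pat, hpatm, h2⟩
            exact Or.inr ⟨pr, hpr, rfl, pat, hpatm, h2⟩
        rw [hfilt, helig, elig_filter_map, List.filter_filter]
        rw [List.nil_append]
        refine congrArg (List.map (fun x : Int × String => x.1)) ?_
        apply List.filter_congr
        intro pr _
        rw [Bool.eq_iff_iff]
        simp only [pvKeep, hq, Bool.and_eq_true, Bool.or_eq_true, Bool.not_eq_true',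
          List.isEmpty_iff, decide_eq_true_eq, decide_eq_false_iff_not, not_or,
          List.any_eq_true]
        constructor
        · rintro ⟨⟨ha, hb⟩, h2 | h2⟩
          · exact absurd h2 hp
          · exact ⟨h2, ha, hb⟩
        · rintro ⟨h2, ha, hb⟩
          exact ⟨⟨ha, hb⟩, Or.inr h2⟩

-- ===== VERDICT (by name: the statement is the Claim_ definition above) =====
theorem select_roi_indices_py_spec : Claim_equal_select_roi_indices_py := by
  intro labels label_patterns _
  unfold Spec_select_roi_indices_py
  exact select_roi_indices_py_eq labels label_patterns
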